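-- pv_equiv track=rewrite | github.com/superboysb-12/AgentCompetitionAnalysisPlatform | LLMRelationExtracter/md_processor.py | _reshape_segments_to_pages
-- ===== SOURCE A (Python) =====
-- from typing import Dict, Iterator, List, Optional, Tuple
--
-- def _segment_char_size(segment: List[Dict]) -> int:
--     total = 0
--     for row in segment:
--         total += len(str(row.get("content", "")))
--         total += len(str(row.get("table_data", "")))
--     return max(total, len(segment))
--
-- def _split_segment_half(segment: List[Dict]) -> Tuple[List[Dict], List[Dict]]:
--     if len(segment) <= 1:
--         return segment, []
--
--     target = _segment_char_size(segment) / 2.0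
--     running = 0
--     split_idx = 0
--     for idx, row in enumerate(segment):
--         running += len(str(row.get("content", ""))) + len(str(row.get("table_data", ""))) + 1
--         if running >= target:
--             split_idx = idx + 1
--             break
--     if split_idx <= 0 or split_idx >= len(segment):
--         split_idx = len(segment) // 2
--     return segment[:split_idx], segment[split_idx:]
--
-- def _reshape_segments_to_pages(segments: List[List[Dict]], target_pages: int) -> List[List[Dict]]:
--     if target_pages <= 0:
--         return segments or [[]]
--
--     working = [list(segment) for segment in (segments or [[]])]
--     if not working:
--         working = [[]]
--
--     while len(working) > target_pages:
--         idx = min(range(len(working)), key=lambda i: _segment_char_size(working[i]))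
--         if idx == 0 and len(working) > 1:
--             working[1] = working[0] + working[1]
--             del working[0]
--         else:
--             working[idx - 1].extend(working[idx])
--             del working[idx]
--
--     while len(working) < target_pages:
--         idx = max(range(len(working)), key=lambda i: _segment_char_size(working[i]))
--         left, right = _split_segment_half(working[idx])
--         if not right:
--             working.insert(idx + 1, [])
--         else:
--             working[idx] = left
--             working.insert(idx + 1, right)
--
--     if len(working) > target_pages:
--         overflow = working[target_pages:]
--         working = working[:target_pages]
--         for extra in overflow:
--             working[-1].extend(extra)
--     elif len(working) < target_pages:
--         working.extend([[] for _ in range(target_pages - len(working))])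
--
--     return working
-- ===== SOURCE B (Python) =====
-- from typing import Dict, List
--
--
-- def _row_chars(row: Dict) -> int:
--     return len(str(row.get("content", ""))) + len(str(row.get("table_data", "")))
--
--
-- def _reshape_segments_to_pages(segments: List[List[Dict]], target_pages: int) -> List[List[Dict]]:
--     if target_pages <= 0:
--         return segments or [[]]
--
--     segs = segments or [[]]
--     # Flatten the rows once and work on page BOUNDARIES into the flat row list;
--     # a page is the interval rows[b[k]:b[k+1]] and its size comes from prefix sums,
--     # so merging is just deleting a boundary and splitting inserts one (found by bisection).
--     rows = [r for seg in segs for r in seg]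
--     P = [0]
--     for r in rows:
--         P.append(P[-1] + _row_chars(r))
--     b = [0]
--     for seg in segs:
--         b.append(b[-1] + len(seg))
--
--     def size(k):
--         s, e = b[k], b[k + 1]
--         return max(P[e] - P[s], e - s)
--
--     while len(b) - 1 > target_pages:
--         k = 0
--         for i in range(1, len(b) - 1):
--             if size(i) < size(k):
--                 k = i
--         # merging the smallest page with its neighbour = removing the boundary between them
--         del b[max(k, 1)]
--
--     while len(b) - 1 < target_pages:
--         k = 0
--         for i in range(1, len(b) - 1):
--             if size(i) > size(k):
--                 k = i
--         s, e = b[k], b[k + 1]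
--         n = e - s
--         if n <= 1:
--             cut = e  # an empty page appears after page k
--         else:
--             tot = max(P[e] - P[s], n)
--             # least j in (s, e] with 2*(P[j] + j) >= tot + 2*(P[s] + s), by bisection
--             thresh = tot + 2 * (P[s] + s)
--             lo, hi = s, e
--             while hi - lo > 1:
--                 mid = (lo + hi) // 2
--                 if 2 * (P[mid] + mid) >= thresh:
--                     hi = mid
--                 else:
--                     lo = mid
--             i = hi - s
--             if i == n:
--                 i = n // 2
--             cut = s + i
--         b.insert(k + 1, cut)
--
--     return [rows[b[k]:b[k + 1]] for k in range(len(b) - 1)]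
-- ===== Notes on version B (the rewrite author's own statement) =====
-- stated objective: alternative
-- what changed: B flattens all rows once into one list with a char-count prefix-sum array and represents pages as boundary indices into it: merging two pages is deleting one boundary, splitting inserts one boundary found by bisection on the prefix sums, and pages are materialised as slices only at the end - no row content is rescanned or concatenated during the reshape iterations (intended as faster; a timing run measured 2.2x at n=16384 but both implementations timed out at the largest size, so no speed is claimed).
import Mathlib
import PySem

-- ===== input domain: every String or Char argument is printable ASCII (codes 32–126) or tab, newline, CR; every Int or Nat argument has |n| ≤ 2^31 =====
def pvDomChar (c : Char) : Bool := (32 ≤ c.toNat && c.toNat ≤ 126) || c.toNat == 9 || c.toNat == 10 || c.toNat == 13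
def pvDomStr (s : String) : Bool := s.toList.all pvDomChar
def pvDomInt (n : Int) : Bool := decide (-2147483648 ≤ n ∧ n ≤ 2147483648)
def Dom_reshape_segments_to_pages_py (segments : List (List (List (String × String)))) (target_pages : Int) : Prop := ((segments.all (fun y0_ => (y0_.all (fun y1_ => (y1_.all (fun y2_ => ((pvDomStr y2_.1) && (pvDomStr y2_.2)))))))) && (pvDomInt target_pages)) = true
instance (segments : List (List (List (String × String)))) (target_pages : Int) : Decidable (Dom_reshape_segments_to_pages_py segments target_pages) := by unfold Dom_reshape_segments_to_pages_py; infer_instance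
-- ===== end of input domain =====

-- B represents pages as boundary indices into the once-flattened row list with a
-- char-count prefix-sum array: merging deletes a boundary, splitting inserts one found
-- by bisection, and pages are materialised as slices only at the end.

abbrev pvRow : Type := List (String × String)
abbrev pvSeg : Type := List pvRow

-- shared by both ports (both sources compute the same per-row quantity
-- len(str(row.get("content",""))) + len(str(row.get("table_data",""))); str() is the
-- identity on the String values here, and Python len = number of chars = toList.length)
def pvRowChars (r : pvRow) : Nat :=
  (PySem.Dict.getD (PySem.Dict.mk r) "content" "").toList.length +
  (PySem.Dict.getD (PySem.Dict.mk r) "table_data" "").toList.length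

-- ===== PORT A =====

-- inner scan of _split_segment_half; 'running >= tot/2.0' is ported exactly as
-- 'tot ≤ 2*running' (exact on the integers appearing here)
def pvFindSplit (tot : Nat) : pvSeg → Nat → Nat → Nat
  | [], _, _ => 0
  | r :: rest, idx, running =>
    let running' := running + pvRowChars r + 1
    if tot ≤ 2 * running' then idx + 1 else pvFindSplit tot rest (idx + 1) running'

-- _segment_char_size
def pvCharSize (seg : pvSeg) : Nat :=
  max (seg.foldl (fun t r => t + pvRowChars r) 0) seg.length

-- min(range(n), key=f) / max(range(n), key=f): first extremal index ([] is unreachable: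
-- Python's min/max raise there, and both loops below only run on a nonempty list)
def pvMinBy (f : Nat → Nat) : List Nat → Nat
  | [] => 0
  | x :: xs => xs.foldl (fun b i => if f i < f b then i else b) x

def pvMaxBy (f : Nat → Nat) : List Nat → Nat
  | [] => 0
  | x :: xs => xs.foldl (fun b i => if f b < f i then i else b) x

-- first while loop of A: merge the smallest segment into its neighbour.
-- Guard '1 < w.length' makes the recursion total; it is implied by the loop guard at
-- every call site (target_pages ≥ 1 there), where Python's branch test 'len(working) > 1'
-- also always holds, so the 'idx == 0 and len > 1' test reduces to 'idx == 0'.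
-- fuel = initial list length only makes the recursion structural (each step removes one
-- segment, so the loop always stops before the fuel does); it changes no computed value
def pvMergeLoopA (target : Int) (fuel : Nat) (w : List pvSeg) : List pvSeg :=
  match fuel with
  | 0 => w
  | fuel + 1 =>
    if target < (w.length : Int) ∧ 1 < w.length then
      let idx := pvMinBy (fun i => pvCharSize (w.getD i [])) (List.range w.length)
      if idx = 0 then
        pvMergeLoopA target fuel ((w.getD 0 [] ++ w.getD 1 []) :: w.drop 2)
      else
        pvMergeLoopA target fuel (w.take (idx - 1) ++ (w.getD (idx - 1) [] ++ w.getD idx []) :: w.drop (idx + 1))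
    else w

-- _split_segment_half
def pvSplitHalfA (seg : pvSeg) : pvSeg × pvSeg :=
  if seg.length ≤ 1 then (seg, [])
  else
    let si0 := pvFindSplit (pvCharSize seg) seg 0 0
    let si := if si0 = 0 ∨ seg.length ≤ si0 then seg.length / 2 else si0
    (seg.take si, seg.drop si)

-- second while loop of A: split the biggest segment.  'w ≠ []' makes the recursion
-- total; it holds at every call site (working is never empty there; Python's max would raise).
-- fuel = (target - len).toNat only makes the recursion structural (each step inserts one
-- page, so the guard fails exactly when the fuel does); it changes no computed value
def pvSplitLoopA (target : Int) (fuel : Nat) (w : List pvSeg) : List pvSeg :=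
  match fuel with
  | 0 => w
  | fuel + 1 =>
    if (w.length : Int) < target ∧ w ≠ [] then
      let idx := pvMaxBy (fun i => pvCharSize (w.getD i [])) (List.range w.length)
      let lr := pvSplitHalfA (w.getD idx [])
      if lr.2 = [] then
        pvSplitLoopA target fuel (PySem.List.insert w ((idx + 1 : Nat) : Int) [])
      else
        pvSplitLoopA target fuel
          (PySem.List.insert (w.take idx ++ lr.1 :: w.drop (idx + 1)) ((idx + 1 : Nat) : Int) lr.2)
    else w

-- trailing fix-up of A: 'for extra in overflow: working[-1].extend(extra)'
-- (dead code — after the two loops len(working) == target_pages — but ported literally;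
-- the getD [] covers Python's IndexError on an empty list, which cannot be reached)
def pvAppendOverflow (kept : List pvSeg) (overflow : List pvSeg) : List pvSeg :=
  overflow.foldl (fun k e => k.dropLast ++ [(k.getLast?.getD []) ++ e]) kept

def reshape_segments_to_pages_py (segments : List (List (List (String × String)))) (target_pages : Int) : List (List (List (String × String))) :=
  if target_pages ≤ 0 then (if segments = [] then [[]] else segments)
  else
    -- [list(segment) for segment in (segments or [[]])] : value-identical copies
    let working := (if segments = [] then [[]] else segments).map (fun s => s)
    let working := if working = [] then [[]] else working  -- 'if not working' (dead)
    let working := pvMergeLoopA target_pages working.length working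
    let working := pvSplitLoopA target_pages (target_pages - working.length).toNat working
    if target_pages < (working.length : Int) then
      pvAppendOverflow (PySem.List.slice working none (some target_pages))
        (PySem.List.slice working (some target_pages) none)
    else if (working.length : Int) < target_pages then
      working ++ List.replicate (target_pages - working.length).toNat []
    else working

-- ===== PORT B =====

-- P = [0]; for r in rows: P.append(P[-1]+rowchars(r))  — the prefix sums, as a scanl
def pvPref (a : Nat) (rows : List pvRow) : List Nat :=
  List.scanl (fun t r => t + pvRowChars r) a rows

-- b = [0]; for seg in segs: b.append(b[-1]+len(seg))  — the page boundaries, as a scanl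
def pvBnd (a : Nat) (w : List pvSeg) : List Nat :=
  List.scanl (fun t s => t + s.length) a w

-- size(k) = max(P[e]-P[s], e-s) with s,e = b[k], b[k+1]  (call sites keep k+1 < b.length)
def pvSizeK (P b : List Nat) (k : Nat) : Nat :=
  max (P.getD (b.getD (k + 1) 0) 0 - P.getD (b.getD k 0) 0) (b.getD (k + 1) 0 - b.getD k 0)

-- B's explicit first-extremal loops: 'k = 0; for i in range(1, n): if key(i) < key(k): k = i'
def pvArgMinB (f : Nat → Nat) (n : Nat) : Nat :=
  ((List.range n).drop 1).foldl (fun b i => if f i < f b then i else b) 0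

def pvArgMaxB (f : Nat → Nat) (n : Nat) : Nat :=
  ((List.range n).drop 1).foldl (fun b i => if f b < f i then i else b) 0

-- the bisection: least j in (lo, hi] with thresh ≤ 2*(P[j]+j), given it holds at hi
def pvBSearch (P : List Nat) (thresh lo hi : Nat) : Nat :=
  if hi - lo ≤ 1 then hi
  else
    let mid := (lo + hi) / 2
    if thresh ≤ 2 * (P.getD mid 0 + mid) then pvBSearch P thresh lo mid
    else pvBSearch P thresh mid hi
termination_by hi - lo
decreasing_by all_goals simp_all; omega

-- _cut_point: where to cut the page rows[s:e] (n ≤ 1 duplicates the end boundary)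
def pvCutB (P : List Nat) (s e : Nat) : Nat :=
  let n := e - s
  if n ≤ 1 then e
  else
    let tot := max (P.getD e 0 - P.getD s 0) n
    let thresh := tot + 2 * (P.getD s 0 + s)
    let j := pvBSearch P thresh s e
    let i := if j - s = n then n / 2 else j - s
    s + i

-- first while loop of B: delete the boundary next to the smallest page.
-- fuel = b.length - 1 only makes the recursion structural (each step deletes one
-- boundary, so the loop stops before the fuel does); it changes no computed value
def pvMergeLoopB (target : Int) (P : List Nat) (fuel : Nat) (b : List Nat) : List Nat :=
  match fuel with
  | 0 => b
  | fuel + 1 =>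
    if target < (b.length : Int) - 1 then
      let k := pvArgMinB (fun i => pvSizeK P b i) (b.length - 1)
      pvMergeLoopB target P fuel (b.eraseIdx (max k 1))
    else b

-- second while loop of B: insert a boundary cutting the biggest page.
-- fuel = (target - (len-1)).toNat only makes the recursion structural; no value changes
def pvSplitLoopB (target : Int) (P : List Nat) (fuel : Nat) (b : List Nat) : List Nat :=
  match fuel with
  | 0 => b
  | fuel + 1 =>
    if (b.length : Int) - 1 < target then
      let k := pvArgMaxB (fun i => pvSizeK P b i) (b.length - 1)
      pvSplitLoopB target P fuel (b.insertIdx (k + 1) (pvCutB P (b.getD k 0) (b.getD (k + 1) 0)))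
    else b

def reshape_segments_to_pages_py_alt (segments : List (List (List (String × String)))) (target_pages : Int) : List (List (List (String × String))) :=
  if target_pages ≤ 0 then (if segments = [] then [[]] else segments)
  else
    let segs := if segments = [] then [[]] else segments
    let rows := segs.flatten                  -- [r for seg in segs for r in seg]
    let P := pvPref 0 rows
    let b := pvBnd 0 segs
    let b := pvMergeLoopB target_pages P (b.length - 1) b
    let b := pvSplitLoopB target_pages P (target_pages - ((b.length : Int) - 1)).toNat b
    (List.range (b.length - 1)).map (fun k =>
      PySem.List.slice rows (some ((b.getD k 0 : Nat) : Int)) (some ((b.getD (k + 1) 0 : Nat) : Int)))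

-- ===== PRECONDITION & SPEC =====
def Spec_reshape_segments_to_pages_py (segments : List (List (List (String × String)))) (target_pages : Int) (out : List (List (List (String × String)))) : Prop := out = reshape_segments_to_pages_py_alt segments target_pages
instance (segments : List (List (List (String × String)))) (target_pages : Int) (out : List (List (List (String × String)))) : Decidable (Spec_reshape_segments_to_pages_py segments target_pages out) := by unfold Spec_reshape_segments_to_pages_py; infer_instance

-- ===== CLAIM (what is proved, stated in full; the proofs are below) =====
def Claim_equal_reshape_segments_to_pages_py : Prop := ∀ (segments : List (List (List (String × String)))) (target_pages : Int), Dom_reshape_segments_to_pages_py segments target_pages → Spec_reshape_segments_to_pages_py segments target_pages (reshape_segments_to_pages_py segments target_pages)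

-- ===== LEMMAS AND PROOFS =====

-- char total of a segment, and its bridge to A's foldl
def pvSegChars (s : pvSeg) : Nat := (s.map pvRowChars).sum

theorem pvSegChars_foldl (l : pvSeg) : ∀ n : Nat, l.foldl (fun t r => t + pvRowChars r) n = n + pvSegChars l := by
  induction l with
  | nil => intro n; simp [pvSegChars]
  | cons r rest ih =>
    intro n
    simp only [pvSegChars, List.foldl_cons, List.map_cons, List.sum_cons] at *
    rw [ih]; omega

theorem pvCharSize_eq (seg : pvSeg) : pvCharSize seg = max (pvSegChars seg) seg.length := by
  unfold pvCharSize
  rw [pvSegChars_foldl]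
  omega

-- generic scanl-of-running-sum lookup
theorem pvScanl_getD {α : Type} (g : α → Nat) :
    ∀ (l : List α) (a k : Nat), k ≤ l.length →
    (List.scanl (fun t x => t + g x) a l).getD k 0 = a + ((l.take k).map g).sum := by
  intro l
  induction l with
  | nil =>
    intro a k hk
    have : k = 0 := Nat.le_zero.mp (by simpa using hk)
    subst this; simp
  | cons x rest ih =>
    intro a k hk
    cases k with
    | zero => simp
    | succ k =>
      simp only [List.scanl_cons, List.getD_cons_succ, List.take_succ_cons, List.map_cons,
        List.sum_cons]
      rw [ih _ k (by simpa using hk)]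
      omega

theorem pvBnd_getD (a : Nat) (w : List pvSeg) (k : Nat) (hk : k ≤ w.length) :
    (pvBnd a w).getD k 0 = a + ((w.take k).map List.length).sum :=
  pvScanl_getD List.length w a k hk

theorem pvBnd_length (a : Nat) (w : List pvSeg) : (pvBnd a w).length = w.length + 1 := by
  simp [pvBnd, List.length_scanl]

theorem pvBnd_cons (a : Nat) (x : pvSeg) (rest : List pvSeg) :
    pvBnd a (x :: rest) = a :: pvBnd (a + x.length) rest := List.scanl_cons ..

-- deleting boundary j merges pages j-1 and j
theorem pvBnd_eraseIdx : ∀ (w : List pvSeg) (a j : Nat), 1 ≤ j → j < w.length →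
    (pvBnd a w).eraseIdx j =
      pvBnd a (w.take (j - 1) ++ (w.getD (j - 1) [] ++ w.getD j []) :: w.drop (j + 1)) := by
  intro w
  induction w with
  | nil => intro a j h1 h2; simp at h2
  | cons x rest ih =>
    intro a j h1 h2
    match j, h1 with
    | 1, _ =>
      match rest, h2 with
      | y :: rest', _ =>
        show (pvBnd a (x :: y :: rest')).eraseIdx 1 = pvBnd a ((x ++ y) :: rest')
        simp only [pvBnd_cons, List.eraseIdx_cons_succ, List.eraseIdx_cons_zero,
          List.length_append]
        rw [Nat.add_assoc]
    | (j' + 2), _ =>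
      have := ih (a + x.length) (j' + 1) (by omega) (by simpa using h2)
      simp only [show j' + 1 - 1 = j' from rfl] at this
      simp only [show j' + 2 - 1 = j' + 1 from rfl, pvBnd_cons, List.eraseIdx_cons_succ,
        List.take_succ_cons, List.getD_cons_succ, List.drop_succ_cons, List.cons_append]
      rw [this]

-- inserting a boundary inside page k splits it at the cut
theorem pvBnd_insertIdx : ∀ (w : List pvSeg) (a k : Nat) (lft rgt : pvSeg),
    k < w.length → w.getD k [] = lft ++ rgt →
    (pvBnd a w).insertIdx (k + 1) (a + ((w.take k).map List.length).sum + lft.length) =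
      pvBnd a (w.take k ++ lft :: rgt :: w.drop (k + 1)) := by
  intro w
  induction w with
  | nil => intro a k l r h1 _; simp at h1
  | cons x rest ih =>
    intro a k lft rgt h1 h2
    cases k with
    | zero =>
      simp only [List.getD_cons_zero] at h2
      subst h2
      simp only [pvBnd_cons, List.take_zero, List.map_nil, List.sum_nil, Nat.add_zero,
        List.drop_succ_cons, List.drop_zero, List.nil_append, List.insertIdx_succ_cons,
        List.insertIdx_zero, List.length_append]
      rw [Nat.add_assoc]
    | succ k =>
      have := ih (a + x.length) k lft rgt (by simpa using h1) (by simpa using h2)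
      simp only [pvBnd_cons, List.take_succ_cons, List.map_cons, List.sum_cons,
        List.drop_succ_cons, List.cons_append, List.insertIdx_succ_cons]
      rw [← this]
      congr 2
      omega

-- the flattened row list is invariant under a merge and under a split
theorem pvFlatten_merge : ∀ (w : List pvSeg) (j : Nat), 1 ≤ j → j < w.length →
    (w.take (j - 1) ++ (w.getD (j - 1) [] ++ w.getD j []) :: w.drop (j + 1)).flatten = w.flatten := by
  intro w
  induction w with
  | nil => intro j h1 h2; simp at h2
  | cons x rest ih =>
    intro j h1 h2
    match j, h1 with
    | 1, _ =>
      match rest, h2 with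
      | y :: rest', _ => simp
    | (j' + 2), _ =>
      have := ih (j' + 1) (by omega) (by simpa using h2)
      simp only [show j' + 1 - 1 = j' from rfl] at this
      simp only [show j' + 2 - 1 = j' + 1 from rfl, List.take_succ_cons, List.getD_cons_succ,
        List.drop_succ_cons, List.cons_append, List.flatten_cons]
      rw [this]

theorem pvFlatten_split : ∀ (w : List pvSeg) (k : Nat) (lft rgt : pvSeg),
    k < w.length → w.getD k [] = lft ++ rgt →
    (w.take k ++ lft :: rgt :: w.drop (k + 1)).flatten = w.flatten := by
  intro w
  induction w with
  | nil => intro k l r h1 _; simp at h1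
  | cons x rest ih =>
    intro k lft rgt h1 h2
    cases k with
    | zero =>
      simp only [List.getD_cons_zero] at h2
      subst h2
      simp
    | succ k =>
      have := ih k lft rgt (by simpa using h1) (by simpa using h2)
      simp only [List.take_succ_cons, List.drop_succ_cons,
        List.cons_append, List.flatten_cons]
      rw [this]

theorem pvCharsum_flatten : ∀ (u : List pvSeg),
    ((u.flatten).map pvRowChars).sum = (u.map pvSegChars).sum := by
  intro u
  induction u with
  | nil => rfl
  | cons x rest ih =>
    simp only [List.flatten_cons, List.map_append, List.sum_append, List.map_cons,
      List.sum_cons]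
    rw [ih]; rfl

-- w decomposed around page k, with the length of the flattened prefix
theorem pvDecomp (w : List pvSeg) (k : Nat) (hk : k < w.length) :
    w.flatten = (w.take k).flatten ++ (w.getD k [] ++ (w.drop (k + 1)).flatten) ∧
      ((w.take k).flatten).length = ((w.take k).map List.length).sum := by
  constructor
  · conv_lhs => rw [← List.take_append_drop k w]
    rw [List.flatten_append, List.drop_eq_getElem_cons hk, List.flatten_cons,
      List.getD_eq_getElem w [] hk]
  · simp [List.length_flatten]

-- prefix-sum lookup inside page k: total chars before the page plus chars of its first i rows
theorem pvPref_getD_mid (w : List pvSeg) (k i : Nat) (hk : k < w.length)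
    (hi : i ≤ (w.getD k []).length) :
    (pvPref 0 w.flatten).getD (((w.take k).map List.length).sum + i) 0 =
      ((w.take k).map pvSegChars).sum + (((w.getD k []).take i).map pvRowChars).sum := by
  obtain ⟨hd, hl⟩ := pvDecomp w k hk
  have hle : ((w.take k).map List.length).sum + i ≤ (w.flatten).length := by
    rw [hd]
    simp only [List.length_append, hl]
    omega
  simp only [pvPref]
  rw [pvScanl_getD pvRowChars _ 0 _ hle, Nat.zero_add, hd, ← hl,
    List.take_length_add_append, List.take_append_of_le_length hi,
    List.map_append, List.sum_append, pvCharsum_flatten]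

theorem pvPref_at_bnd (w : List pvSeg) (k : Nat) (hk : k ≤ w.length) :
    (pvPref 0 w.flatten).getD (((w.take k).map List.length).sum) 0 =
      ((w.take k).map pvSegChars).sum := by
  rcases Nat.lt_or_ge k w.length with h | h
  · have := pvPref_getD_mid w k 0 h (by omega)
    simpa using this
  · have hk' : k = w.length := by omega
    subst hk'
    simp only [List.take_length]
    have hlen : ((w.map List.length).sum) = (w.flatten).length := List.length_flatten.symm
    simp only [pvPref]
    rw [hlen, pvScanl_getD pvRowChars _ 0 _ (le_refl _), Nat.zero_add,
      List.take_length, pvCharsum_flatten]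

theorem pvTake_succ_getD (w : List pvSeg) (k : Nat) (hk : k < w.length) :
    w.take (k + 1) = w.take k ++ [w.getD k []] := by
  rw [List.getD_eq_getElem w [] hk, ← List.take_concat_get']

-- pvSizeK over the boundary list = A's pvCharSize of the page
theorem pvSizeK_eq (w : List pvSeg) (k : Nat) (hk : k < w.length) :
    pvSizeK (pvPref 0 w.flatten) (pvBnd 0 w) k = pvCharSize (w.getD k []) := by
  unfold pvSizeK
  rw [pvBnd_getD 0 w k (by omega), pvBnd_getD 0 w (k + 1) (by omega)]
  simp only [Nat.zero_add]
  rw [pvPref_at_bnd w k (by omega), pvPref_at_bnd w (k + 1) (by omega),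
    pvTake_succ_getD w k hk]
  simp only [List.map_append, List.sum_append, List.map_cons, List.map_nil, List.sum_cons,
    List.sum_nil, Nat.add_zero]
  rw [pvCharSize_eq]
  omega

-- first-extremal folds only look at indices in {acc} ∪ l
theorem pvFoldMin_congr (f g : Nat → Nat) :
    ∀ (l : List Nat) (acc : Nat), (∀ i ∈ acc :: l, f i = g i) →
    l.foldl (fun b i => if f i < f b then i else b) acc =
      l.foldl (fun b i => if g i < g b then i else b) acc := by
  intro l
  induction l with
  | nil => intro acc _; rfl
  | cons x rest ih =>
    intro acc h
    have hx : f x = g x := h x (by simp)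
    have hacc : f acc = g acc := h acc (by simp)
    simp only [List.foldl_cons, hx, hacc]
    apply ih
    intro i hi
    rcases List.mem_cons.mp hi with rfl | hi
    · split <;> [exact hx; exact hacc]
    · exact h i (by simp [hi])

theorem pvFoldMax_congr (f g : Nat → Nat) :
    ∀ (l : List Nat) (acc : Nat), (∀ i ∈ acc :: l, f i = g i) →
    l.foldl (fun b i => if f b < f i then i else b) acc =
      l.foldl (fun b i => if g b < g i then i else b) acc := by
  intro l
  induction l with
  | nil => intro acc _; rfl
  | cons x rest ih =>
    intro acc h
    have hx : f x = g x := h x (by simp)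
    have hacc : f acc = g acc := h acc (by simp)
    simp only [List.foldl_cons, hx, hacc]
    apply ih
    intro i hi
    rcases List.mem_cons.mp hi with rfl | hi
    · split <;> [exact hx; exact hacc]
    · exact h i (by simp [hi])

theorem pvArgMinB_eq (f : Nat → Nat) (n : Nat) (hn : 0 < n) :
    pvArgMinB f n = pvMinBy f (List.range n) := by
  obtain ⟨m, rfl⟩ := Nat.exists_eq_add_of_lt hn
  rw [show 0 + m + 1 = m + 1 by omega]
  simp only [pvArgMinB, pvMinBy, List.range_succ_eq_map, List.drop_one, List.tail_cons]

theorem pvArgMaxB_eq (f : Nat → Nat) (n : Nat) (hn : 0 < n) :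
    pvArgMaxB f n = pvMaxBy f (List.range n) := by
  obtain ⟨m, rfl⟩ := Nat.exists_eq_add_of_lt hn
  rw [show 0 + m + 1 = m + 1 by omega]
  simp only [pvArgMaxB, pvMaxBy, List.range_succ_eq_map, List.drop_one, List.tail_cons]

-- B's argmin over pvSizeK = A's argmin over pvCharSize (and likewise argmax)
theorem pvArgMin_corr (w : List pvSeg) (hw : w ≠ []) :
    pvArgMinB (fun i => pvSizeK (pvPref 0 w.flatten) (pvBnd 0 w) i) ((pvBnd 0 w).length - 1) =
      pvMinBy (fun i => pvCharSize (w.getD i [])) (List.range w.length) := by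
  have hn : 0 < w.length := List.length_pos_of_ne_nil hw
  rw [pvBnd_length]
  simp only [Nat.add_sub_cancel]
  rw [show pvArgMinB (fun i => pvSizeK (pvPref 0 w.flatten) (pvBnd 0 w) i) w.length =
      pvArgMinB (fun i => pvCharSize (w.getD i [])) w.length from ?_, pvArgMinB_eq _ _ hn]
  unfold pvArgMinB
  apply pvFoldMin_congr
  intro i hi
  rcases List.mem_cons.mp hi with rfl | hi
  · exact pvSizeK_eq w 0 hn
  · exact pvSizeK_eq w i (List.mem_range.mp (List.mem_of_mem_drop hi))

theorem pvArgMax_corr (w : List pvSeg) (hw : w ≠ []) :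
    pvArgMaxB (fun i => pvSizeK (pvPref 0 w.flatten) (pvBnd 0 w) i) ((pvBnd 0 w).length - 1) =
      pvMaxBy (fun i => pvCharSize (w.getD i [])) (List.range w.length) := by
  have hn : 0 < w.length := List.length_pos_of_ne_nil hw
  rw [pvBnd_length]
  simp only [Nat.add_sub_cancel]
  rw [show pvArgMaxB (fun i => pvSizeK (pvPref 0 w.flatten) (pvBnd 0 w) i) w.length =
      pvArgMaxB (fun i => pvCharSize (w.getD i [])) w.length from ?_, pvArgMaxB_eq _ _ hn]
  unfold pvArgMaxB
  apply pvFoldMax_congr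
  intro i hi
  rcases List.mem_cons.mp hi with rfl | hi
  · exact pvSizeK_eq w 0 hn
  · exact pvSizeK_eq w i (List.mem_range.mp (List.mem_of_mem_drop hi))

theorem pv_argfold_mem (g : Nat → Nat → Nat) (hg : ∀ b i, g b i = b ∨ g b i = i) :
    ∀ (xs : List Nat) (b : Nat), xs.foldl g b ∈ b :: xs := by
  intro xs
  induction xs with
  | nil => intro b; simp
  | cons x xs ih =>
    intro b
    simp only [List.foldl_cons]
    have h := ih (g b x)
    simp only [List.mem_cons] at h ⊢
    rcases hg b x with h0 | h0 <;> rw [h0] at h ⊢ <;> tauto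

theorem pvMinBy_range_lt (f : Nat → Nat) (n : Nat) (hn : 0 < n) :
    pvMinBy f (List.range n) < n := by
  obtain ⟨m, rfl⟩ := Nat.exists_eq_add_of_lt hn
  rw [show 0 + m + 1 = m + 1 by omega, List.range_succ_eq_map]
  have h := pv_argfold_mem (fun b i => if f i < f b then i else b)
    (by intro b i; by_cases h : f i < f b <;> simp [h]) ((List.range m).map Nat.succ) 0
  simp only [pvMinBy]
  rcases List.mem_cons.mp h with h1 | h1
  · omega
  · obtain ⟨k, hk, hk2⟩ := List.mem_map.mp h1
    have := List.mem_range.mp hk; omega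

theorem pvMaxBy_range_lt (f : Nat → Nat) (n : Nat) (hn : 0 < n) :
    pvMaxBy f (List.range n) < n := by
  obtain ⟨m, rfl⟩ := Nat.exists_eq_add_of_lt hn
  rw [show 0 + m + 1 = m + 1 by omega, List.range_succ_eq_map]
  have h := pv_argfold_mem (fun b i => if f b < f i then i else b)
    (by intro b i; by_cases h : f b < f i <;> simp [h]) ((List.range m).map Nat.succ) 0
  simp only [pvMaxBy]
  rcases List.mem_cons.mp h with h1 | h1
  · omega
  · obtain ⟨k, hk, hk2⟩ := List.mem_map.mp h1
    have := List.mem_range.mp hk; omega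

-- running total of A's split scan after i rows
def pvFs (seg : pvSeg) (i : Nat) : Nat := ((seg.take i).map (fun r => pvRowChars r + 1)).sum

theorem pvFs_mono (seg : pvSeg) (i j : Nat) (h : i ≤ j) : pvFs seg i ≤ pvFs seg j := by
  unfold pvFs
  rw [show j = i + (j - i) by omega, List.take_add, List.map_append, List.sum_append]
  omega

theorem pvFs_eq (seg : pvSeg) (i : Nat) (hi : i ≤ seg.length) :
    pvFs seg i = ((seg.take i).map pvRowChars).sum + i := by
  unfold pvFs
  induction seg generalizing i with
  | nil =>
    have : i = 0 := Nat.le_zero.mp (by simpa using hi)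
    subst this; simp
  | cons x rest ih =>
    cases i with
    | zero => simp
    | succ i =>
      simp only [List.take_succ_cons, List.map_cons, List.sum_cons]
      rw [ih i (by simpa using hi)]
      omega

-- A's linear scan finds the least i with tot ≤ 2*(running + Fs i)
theorem pvFindSplit_spec (tot : Nat) :
    ∀ (seg : pvSeg) (idx running : Nat), 0 < seg.length →
    tot ≤ 2 * (running + pvFs seg seg.length) →
    ∃ i, pvFindSplit tot seg idx running = idx + i ∧ 1 ≤ i ∧ i ≤ seg.length ∧
      tot ≤ 2 * (running + pvFs seg i) ∧
      ∀ j, 1 ≤ j → j < i → ¬ tot ≤ 2 * (running + pvFs seg j) := by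
  intro seg
  induction seg with
  | nil => intro idx running h _; simp at h
  | cons x rest ih =>
    intro idx running _ hex
    have hFs1 : pvFs (x :: rest) 1 = pvRowChars x + 1 := by simp [pvFs]
    have hFsS : ∀ m, pvFs (x :: rest) (m + 1) = (pvRowChars x + 1) + pvFs rest m := by
      intro m
      simp only [pvFs, List.take_succ_cons, List.map_cons, List.sum_cons]
    by_cases hb : tot ≤ 2 * (running + pvRowChars x + 1)
    · refine ⟨1, ?_, by omega, by simp, by rw [hFs1]; omega, by omega⟩
      simp [pvFindSplit, hb]
    · have hrest : 0 < rest.length := by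
        rcases rest with _ | _
        · exfalso; apply hb
          have := hex
          rw [show (x :: ([] : pvSeg)).length = 1 from rfl, hFs1] at this
          omega
        · simp
      have hex' : tot ≤ 2 * ((running + pvRowChars x + 1) + pvFs rest rest.length) := by
        have := hex
        rw [show (x :: rest).length = rest.length + 1 from rfl, hFsS] at this
        omega
      obtain ⟨i', h1, h2, h3, h4, h5⟩ := ih (idx + 1) (running + pvRowChars x + 1) hrest hex'
      refine ⟨i' + 1, ?_, by omega, by simp; omega, by rw [hFsS]; omega, ?_⟩
      · simp only [pvFindSplit, hb, if_false]
        rw [h1]; omega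
      · intro j hj1 hj2
        cases j with
        | zero => omega
        | succ j' =>
          rcases Nat.eq_zero_or_pos j' with rfl | hj'
          · rw [hFs1]; omega
          · rw [hFsS]
            have := h5 j' hj' (by omega)
            omega

-- the bisection returns the least index satisfying the (monotone) threshold test
theorem pvBSearch_spec (P : List Nat) (thresh : Nat) :
    ∀ (lo hi : Nat), lo < hi →
    thresh ≤ 2 * (P.getD hi 0 + hi) → ¬ thresh ≤ 2 * (P.getD lo 0 + lo) →
    lo < pvBSearch P thresh lo hi ∧ pvBSearch P thresh lo hi ≤ hi ∧
      thresh ≤ 2 * (P.getD (pvBSearch P thresh lo hi) 0 + pvBSearch P thresh lo hi) ∧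
      ¬ thresh ≤ 2 * (P.getD (pvBSearch P thresh lo hi - 1) 0 + (pvBSearch P thresh lo hi - 1)) := by
  intro lo hi
  fun_induction pvBSearch P thresh lo hi with
  | case1 lo hi hle =>
    intro hlt hhi hlo
    have : hi = lo + 1 := by omega
    subst this
    refine ⟨by omega, le_refl _, hhi, ?_⟩
    simpa using hlo
  | case2 lo hi hgt mid hmid ih =>
    intro hlt hhi hlo
    obtain ⟨a, b, c, d⟩ := ih (by omega) hmid hlo
    exact ⟨a, by omega, c, d⟩
  | case3 lo hi hgt mid hmid ih =>
    intro hlt hhi hlo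
    obtain ⟨a, b, c, d⟩ := ih (by omega) hhi hmid
    exact ⟨by omega, b, c, d⟩

-- A's split index, isolated for the proofs
def pvSi (seg : pvSeg) : Nat :=
  if pvFindSplit (pvCharSize seg) seg 0 0 = 0 ∨ seg.length ≤ pvFindSplit (pvCharSize seg) seg 0 0
  then seg.length / 2 else pvFindSplit (pvCharSize seg) seg 0 0

theorem pvSplitHalfA_eq (seg : pvSeg) (h2 : 2 ≤ seg.length) :
    pvSplitHalfA seg = (seg.take (pvSi seg), seg.drop (pvSi seg)) := by
  unfold pvSplitHalfA pvSi
  rw [if_neg (by omega)]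

-- existence for the scan: the test certainly holds after the whole page
theorem pvSi_ex (seg : pvSeg) (h2 : 2 ≤ seg.length) :
    pvCharSize seg ≤ 2 * (0 + pvFs seg seg.length) := by
  rw [pvFs_eq seg seg.length (le_refl _), List.take_length, pvCharSize_eq]
  unfold pvSegChars
  omega

theorem pvSi_bounds (seg : pvSeg) (h2 : 2 ≤ seg.length) :
    1 ≤ pvSi seg ∧ pvSi seg < seg.length := by
  obtain ⟨i, h1, hi1, hi2, _, _⟩ :=
    pvFindSplit_spec (pvCharSize seg) seg 0 0 (by omega) (pvSi_ex seg h2)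
  unfold pvSi
  rw [h1]
  simp only [Nat.zero_add]
  split <;> omega

-- boundary-list lookups at page k (zero-based running sums)
theorem pvBnd0_getD (w : List pvSeg) (k : Nat) (hk : k ≤ w.length) :
    (pvBnd 0 w).getD k 0 = ((w.take k).map List.length).sum := by
  rw [pvBnd_getD 0 w k hk, Nat.zero_add]

theorem pvBnd0_getD_succ (w : List pvSeg) (k : Nat) (hk : k < w.length) :
    (pvBnd 0 w).getD (k + 1) 0 =
      ((w.take k).map List.length).sum + (w.getD k []).length := by
  rw [pvBnd0_getD w (k + 1) (by omega), pvTake_succ_getD w k hk]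
  simp

theorem pvSplitHalfA_snd_ne (seg : pvSeg) (h2 : 2 ≤ seg.length) :
    (pvSplitHalfA seg).2 ≠ [] := by
  rw [pvSplitHalfA_eq seg h2]
  have := pvSi_bounds seg h2
  show seg.drop (pvSi seg) ≠ []
  intro hcon
  rw [List.drop_eq_nil_iff] at hcon
  omega

-- Python's insert just after position idx, in the decomposed form
theorem pv_insert_after {α : Type} (l1 l2 : List α) (x y : α) :
    PySem.List.insert (l1 ++ x :: l2) ((l1.length + 1 : Nat) : Int) y = l1 ++ x :: y :: l2 := by
  rw [show l1 ++ x :: l2 = (l1 ++ [x]) ++ l2 by simp]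
  rw [PySem.List.insert_natCast _ _ _ (by simp)]
  rw [show l1.length + 1 = (l1 ++ [x]).length by simp]
  rw [List.take_left, List.drop_left]
  simp

-- B's bisected cut offset = A's scanned split index, page by page
theorem pvCut_eq (w : List pvSeg) (k : Nat) (hk : k < w.length)
    (h2 : 2 ≤ (w.getD k []).length) :
    pvCutB (pvPref 0 w.flatten) ((pvBnd 0 w).getD k 0) ((pvBnd 0 w).getD (k + 1) 0) =
      ((w.take k).map List.length).sum + pvSi (w.getD k []) := by
  rw [pvBnd0_getD w k hk.le, pvBnd0_getD_succ w k hk]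
  unfold pvCutB
  rw [if_neg (by omega)]
  simp only []
  -- the threshold test at boundary S + i is A's scan test at step i
  have htrans : ∀ i, i ≤ (w.getD k []).length →
      ((max ((pvPref 0 w.flatten).getD (((w.take k).map List.length).sum + (w.getD k []).length) 0 -
            (pvPref 0 w.flatten).getD (((w.take k).map List.length).sum) 0)
          (((w.take k).map List.length).sum + (w.getD k []).length - ((w.take k).map List.length).sum) +
          2 * ((pvPref 0 w.flatten).getD (((w.take k).map List.length).sum) 0 + ((w.take k).map List.length).sum) ≤
        2 * ((pvPref 0 w.flatten).getD (((w.take k).map List.length).sum + i) 0 + (((w.take k).map List.length).sum + i))) ↔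
        pvCharSize (w.getD k []) ≤ 2 * (0 + pvFs (w.getD k []) i)) := by
    intro i hi
    have hmid := pvPref_getD_mid w k i hk hi
    have hfull := pvPref_getD_mid w k (w.getD k []).length hk (le_refl _)
    have hat := pvPref_at_bnd w k hk.le
    rw [List.take_length] at hfull
    rw [hmid, hfull, hat, pvFs_eq (w.getD k []) i hi, pvCharSize_eq]
    unfold pvSegChars
    omega
  have hex := pvSi_ex (w.getD k []) h2
  obtain ⟨iA, hA1, hA2, hA3, hA4, hA5⟩ :=
    pvFindSplit_spec (pvCharSize (w.getD k [])) (w.getD k []) 0 0 (by omega) hex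
  have hbs := pvBSearch_spec (pvPref 0 w.flatten)
    (max ((pvPref 0 w.flatten).getD (((w.take k).map List.length).sum + (w.getD k []).length) 0 -
        (pvPref 0 w.flatten).getD (((w.take k).map List.length).sum) 0)
      (((w.take k).map List.length).sum + (w.getD k []).length - ((w.take k).map List.length).sum) +
      2 * ((pvPref 0 w.flatten).getD (((w.take k).map List.length).sum) 0 + ((w.take k).map List.length).sum))
    (((w.take k).map List.length).sum) (((w.take k).map List.length).sum + (w.getD k []).length)
    (by omega)
    (by rw [htrans (w.getD k []).length (le_refl _)]; exact hex)
    (by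
      have h0 := htrans 0 (by omega)
      rw [Nat.add_zero] at h0
      rw [h0]
      simp only [pvFs, List.take_zero, List.map_nil, List.sum_nil, Nat.mul_zero, Nat.add_zero]
      rw [pvCharSize_eq]
      omega)
  set j := pvBSearch (pvPref 0 w.flatten)
    (max ((pvPref 0 w.flatten).getD (((w.take k).map List.length).sum + (w.getD k []).length) 0 -
        (pvPref 0 w.flatten).getD (((w.take k).map List.length).sum) 0)
      (((w.take k).map List.length).sum + (w.getD k []).length - ((w.take k).map List.length).sum) +
      2 * ((pvPref 0 w.flatten).getD (((w.take k).map List.length).sum) 0 + ((w.take k).map List.length).sum))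
    (((w.take k).map List.length).sum) (((w.take k).map List.length).sum + (w.getD k []).length)
    with hjdef
  obtain ⟨hb1, hb2, hb3, hb4⟩ := hbs
  have hpredB : pvCharSize (w.getD k []) ≤
      2 * (0 + pvFs (w.getD k []) (j - ((w.take k).map List.length).sum)) := by
    rw [← htrans (j - ((w.take k).map List.length).sum) (by omega),
      show ((w.take k).map List.length).sum + (j - ((w.take k).map List.length).sum) = j by omega]
    exact hb3
  have hnpredB : ¬ pvCharSize (w.getD k []) ≤
      2 * (0 + pvFs (w.getD k []) (j - ((w.take k).map List.length).sum - 1)) := by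
    rw [← htrans (j - ((w.take k).map List.length).sum - 1) (by omega),
      show ((w.take k).map List.length).sum + (j - ((w.take k).map List.length).sum - 1) = j - 1 by omega]
    exact hb4
  -- uniqueness: the scanned first hit and the bisected least point coincide
  have huniq : iA = j - ((w.take k).map List.length).sum := by
    rcases Nat.lt_trichotomy iA (j - ((w.take k).map List.length).sum) with h | h | h
    · exfalso
      apply hnpredB
      have := pvFs_mono (w.getD k []) iA (j - ((w.take k).map List.length).sum - 1) (by omega)
      omega
    · exact h
    · exact absurd hpredB (hA5 _ (by omega) h)
  -- assemble
  unfold pvSi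
  rw [hA1]
  simp only [Nat.zero_add]
  rw [show ((w.take k).map List.length).sum + (w.getD k []).length -
      ((w.take k).map List.length).sum = (w.getD k []).length by omega]
  congr 1
  by_cases hcase : iA = (w.getD k []).length
  · rw [if_pos (by omega), if_pos (by omega)]
  · rw [if_neg (by omega), if_neg (by omega)]
    omega

-- one unfolded step of each B loop (the local names of the loop body, inlined)
theorem pvMergeLoopB_succ (target : Int) (P : List Nat) (fuel : Nat) (b : List Nat)
    (h : target < (b.length : Int) - 1) :
    pvMergeLoopB target P (fuel + 1) b = pvMergeLoopB target P fuel
      (b.eraseIdx (max (pvArgMinB (fun i => pvSizeK P b i) (b.length - 1)) 1)) := by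
  rw [pvMergeLoopB, if_pos h]

theorem pvMergeLoopB_stop (target : Int) (P : List Nat) (fuel : Nat) (b : List Nat)
    (h : ¬ target < (b.length : Int) - 1) :
    pvMergeLoopB target P (fuel + 1) b = b := by
  rw [pvMergeLoopB, if_neg h]

theorem pvSplitLoopB_succ (target : Int) (P : List Nat) (fuel : Nat) (b : List Nat)
    (h : (b.length : Int) - 1 < target) :
    pvSplitLoopB target P (fuel + 1) b = pvSplitLoopB target P fuel
      (b.insertIdx ((pvArgMaxB (fun i => pvSizeK P b i) (b.length - 1)) + 1)
        (pvCutB P (b.getD (pvArgMaxB (fun i => pvSizeK P b i) (b.length - 1)) 0)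
          (b.getD ((pvArgMaxB (fun i => pvSizeK P b i) (b.length - 1)) + 1) 0))) := by
  rw [pvSplitLoopB, if_pos h]

theorem pvSplitLoopB_stop (target : Int) (P : List Nat) (fuel : Nat) (b : List Nat)
    (h : ¬ (b.length : Int) - 1 < target) :
    pvSplitLoopB target P (fuel + 1) b = b := by
  rw [pvSplitLoopB, if_neg h]

-- merge-loop correspondence: B's boundary loop simulates A's list loop
theorem pvMergeLoop_corr (rs : List pvRow) (target : Int) (ht : 1 ≤ target) :
    ∀ (fuel : Nat) (w : List pvSeg), w ≠ [] → w.flatten = rs →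
    pvMergeLoopB target (pvPref 0 rs) fuel (pvBnd 0 w) = pvBnd 0 (pvMergeLoopA target fuel w) := by
  intro fuel w
  fun_induction pvMergeLoopA target fuel w with
  | case1 w => intro _ _; rfl
  | case2 w fuel h idx hidx ih =>
    intro hw hrs
    have hguard : target < ((pvBnd 0 w).length : Int) - 1 := by
      rw [pvBnd_length]; push_cast; omega
    rw [pvMergeLoopB_succ _ _ _ _ hguard, ← hrs, pvArgMin_corr w hw]
    have hidx0 : pvMinBy (fun i => pvCharSize (w.getD i [])) (List.range w.length) = 0 := hidx
    rw [hidx0, show max 0 1 = 1 from rfl, pvBnd_eraseIdx w 0 1 (by omega) (by omega), hrs,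
      show (1 : Nat) - 1 = 0 from rfl, List.take_zero, List.nil_append]
    exact ih (by simp) (by rw [← hrs, ← pvFlatten_merge w 1 (by omega) (by omega)]; simp)
  | case3 w fuel h idx hidx ih =>
    intro hw hrs
    have hguard : target < ((pvBnd 0 w).length : Int) - 1 := by
      rw [pvBnd_length]; push_cast; omega
    have hidxlt : idx < w.length := pvMinBy_range_lt _ _ (by omega)
    rw [pvMergeLoopB_succ _ _ _ _ hguard, ← hrs, pvArgMin_corr w hw]
    have hidx0 : pvMinBy (fun i => pvCharSize (w.getD i [])) (List.range w.length) = idx := rfl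
    rw [hidx0, show max idx 1 = idx by omega, pvBnd_eraseIdx w 0 idx (by omega) hidxlt, hrs]
    exact ih (by simp) (by rw [← hrs]; exact pvFlatten_merge w idx (by omega) hidxlt)
  | case4 w fuel h =>
    intro hw hrs
    have hn : 0 < w.length := List.length_pos_of_ne_nil hw
    rw [pvMergeLoopB_stop _ _ _ _ (by rw [pvBnd_length]; push_cast; omega)]

-- split-loop correspondence
theorem pvSplitLoop_corr (rs : List pvRow) (target : Int) :
    ∀ (fuel : Nat) (w : List pvSeg), w ≠ [] → w.flatten = rs →
    pvSplitLoopB target (pvPref 0 rs) fuel (pvBnd 0 w) = pvBnd 0 (pvSplitLoopA target fuel w) := by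
  intro fuel w
  fun_induction pvSplitLoopA target fuel w with
  | case1 w => intro _ _; rfl
  | case2 w fuel h idx lr heq ih =>
    -- A's right half is empty: the page has at most one row, B duplicates its end boundary
    intro hw hrs
    have hn : 0 < w.length := List.length_pos_of_ne_nil hw
    have hidxlt : idx < w.length := pvMaxBy_range_lt _ _ hn
    have hguard : ((pvBnd 0 w).length : Int) - 1 < target := by
      rw [pvBnd_length]; push_cast; omega
    have heq' : (pvSplitHalfA (w.getD idx [])).2 = [] := heq
    have hlen1 : (w.getD idx []).length ≤ 1 := by
      by_contra hlen
      exact pvSplitHalfA_snd_ne (w.getD idx []) (by omega) heq'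
    rw [pvSplitLoopB_succ _ _ _ _ hguard, ← hrs, pvArgMax_corr w hw]
    have hidx0 : pvMaxBy (fun i => pvCharSize (w.getD i [])) (List.range w.length) = idx := rfl
    rw [hidx0]
    have hcc : pvCutB (pvPref 0 w.flatten) ((pvBnd 0 w).getD idx 0)
        ((pvBnd 0 w).getD (idx + 1) 0) = (pvBnd 0 w).getD (idx + 1) 0 := by
      unfold pvCutB
      rw [if_pos (by rw [pvBnd0_getD w idx hidxlt.le, pvBnd0_getD_succ w idx hidxlt]; omega)]
    rw [hcc, pvBnd0_getD_succ w idx hidxlt,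
      show ((w.take idx).map List.length).sum + (w.getD idx []).length =
        0 + ((w.take idx).map List.length).sum + (w.getD idx []).length by omega,
      pvBnd_insertIdx w 0 idx (w.getD idx []) [] hidxlt (by simp), hrs]
    have hAins : PySem.List.insert w ((idx + 1 : Nat) : Int) ([] : pvSeg) =
        w.take idx ++ w.getD idx [] :: [] :: w.drop (idx + 1) := by
      rw [PySem.List.insert_natCast _ _ _ (by omega), pvTake_succ_getD w idx hidxlt]
      simp
    rw [← hAins]
    exact ih (by rw [hAins]; simp) (by
      rw [hAins, ← hrs]
      exact pvFlatten_split w idx (w.getD idx []) [] hidxlt (by simp))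
  | case3 w fuel h idx lr heq ih =>
    -- proper split: B inserts the bisected cut boundary
    intro hw hrs
    have hn : 0 < w.length := List.length_pos_of_ne_nil hw
    have hidxlt : idx < w.length := pvMaxBy_range_lt _ _ hn
    have hguard : ((pvBnd 0 w).length : Int) - 1 < target := by
      rw [pvBnd_length]; push_cast; omega
    have h2 : 2 ≤ (w.getD idx []).length := by
      by_contra hlen
      apply heq
      show (pvSplitHalfA (w.getD idx [])).2 = []
      unfold pvSplitHalfA
      rw [if_pos (by omega)]
    have hsi := pvSi_bounds (w.getD idx []) h2
    have hlr : lr = ((w.getD idx []).take (pvSi (w.getD idx [])),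
        (w.getD idx []).drop (pvSi (w.getD idx []))) := by
      show pvSplitHalfA (w.getD idx []) = _
      exact pvSplitHalfA_eq _ h2
    rw [pvSplitLoopB_succ _ _ _ _ hguard, ← hrs, pvArgMax_corr w hw]
    have hidx0 : pvMaxBy (fun i => pvCharSize (w.getD i [])) (List.range w.length) = idx := rfl
    rw [hidx0, pvCut_eq w idx hidxlt h2]
    have htk : ((w.getD idx []).take (pvSi (w.getD idx []))).length = pvSi (w.getD idx []) := by
      simp only [List.length_take]
      omega
    rw [show ((w.take idx).map List.length).sum + pvSi (w.getD idx []) =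
      0 + ((w.take idx).map List.length).sum +
      ((w.getD idx []).take (pvSi (w.getD idx []))).length by rw [htk]; omega,
      pvBnd_insertIdx w 0 idx ((w.getD idx []).take (pvSi (w.getD idx [])))
        ((w.getD idx []).drop (pvSi (w.getD idx []))) hidxlt (by simp), hrs]
    have htkA : (w.take idx).length = idx := by simp; omega
    have hAins : PySem.List.insert (w.take idx ++ lr.1 :: w.drop (idx + 1))
        ((idx + 1 : Nat) : Int) lr.2 = w.take idx ++ lr.1 :: lr.2 :: w.drop (idx + 1) := by
      have h0 := pv_insert_after (w.take idx) (w.drop (idx + 1)) lr.1 lr.2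
      rwa [htkA] at h0
    rw [show w.take idx ++ ((w.getD idx []).take (pvSi (w.getD idx []))) ::
          ((w.getD idx []).drop (pvSi (w.getD idx []))) :: w.drop (idx + 1) =
        w.take idx ++ lr.1 :: lr.2 :: w.drop (idx + 1) by rw [hlr], ← hAins]
    exact ih (by rw [hAins]; simp) (by
      rw [hAins, hlr, ← hrs]
      exact pvFlatten_split w idx _ _ hidxlt (by simp))
  | case4 w fuel h =>
    intro hw hrs
    have hn : 0 < w.length := List.length_pos_of_ne_nil hw
    have h2 : ¬ (w.length : Int) < target := fun hx => h ⟨hx, hw⟩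
    rw [pvSplitLoopB_stop _ _ _ _ (by rw [pvBnd_length]; push_cast; omega)]

theorem pvSplitHalfA_append (seg : pvSeg) :
    (pvSplitHalfA seg).1 ++ (pvSplitHalfA seg).2 = seg := by
  unfold pvSplitHalfA
  split
  · simp
  · simp

-- the flattened rows are unchanged by A's split loop
theorem pvSplitLoopA_flatten (target : Int) (fuel : Nat) (w : List pvSeg) :
    (pvSplitLoopA target fuel w).flatten = w.flatten := by
  fun_induction pvSplitLoopA target fuel w with
  | case1 w => rfl
  | case2 w fuel h idx lr heq ih =>
    have hidxlt : idx < w.length := pvMaxBy_range_lt _ _ (List.length_pos_of_ne_nil h.2)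
    rw [ih]
    have hAins : PySem.List.insert w ((idx + 1 : Nat) : Int) ([] : pvSeg) =
        w.take idx ++ w.getD idx [] :: [] :: w.drop (idx + 1) := by
      rw [PySem.List.insert_natCast _ _ _ (by omega), pvTake_succ_getD w idx hidxlt]
      simp
    rw [hAins]
    exact pvFlatten_split w idx (w.getD idx []) [] hidxlt (by simp)
  | case3 w fuel h idx lr heq ih =>
    have hidxlt : idx < w.length := pvMaxBy_range_lt _ _ (List.length_pos_of_ne_nil h.2)
    rw [ih]
    have htkA : (w.take idx).length = idx := by simp; omega
    have hAins : PySem.List.insert (w.take idx ++ lr.1 :: w.drop (idx + 1))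
        ((idx + 1 : Nat) : Int) lr.2 = w.take idx ++ lr.1 :: lr.2 :: w.drop (idx + 1) := by
      have h0 := pv_insert_after (w.take idx) (w.drop (idx + 1)) lr.1 lr.2
      rwa [htkA] at h0
    rw [hAins]
    exact pvFlatten_split w idx lr.1 lr.2 hidxlt (pvSplitHalfA_append (w.getD idx [])).symm
  | case4 w fuel h => rfl

-- materialising the boundary list slices back exactly the pages
theorem pvMaterialize (rs : List pvRow) (w : List pvSeg) (hw : w.flatten = rs) :
    (List.range ((pvBnd 0 w).length - 1)).map (fun k =>
      PySem.List.slice rs (some (((pvBnd 0 w).getD k 0 : Nat) : Int))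
        (some (((pvBnd 0 w).getD (k + 1) 0 : Nat) : Int))) = w := by
  rw [pvBnd_length]
  simp only [Nat.add_sub_cancel]
  have hpt : ∀ k ∈ List.range w.length,
      PySem.List.slice rs (some (((pvBnd 0 w).getD k 0 : Nat) : Int))
        (some (((pvBnd 0 w).getD (k + 1) 0 : Nat) : Int)) = w.getD k [] := by
    intro k hkmem
    have hk : k < w.length := List.mem_range.mp hkmem
    obtain ⟨hd, hl⟩ := pvDecomp w k hk
    rw [pvBnd0_getD w k hk.le, pvBnd0_getD_succ w k hk, PySem.List.slice_natCast,
      show ((w.take k).map List.length).sum + (w.getD k []).length -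
        ((w.take k).map List.length).sum = (w.getD k []).length by omega,
      ← hw, hd, ← hl, List.drop_left, List.take_left']
    simp
  rw [List.map_congr_left hpt]
  apply List.ext_getElem (by simp)
  intro i h1 h2
  simp only [List.getElem_map, List.getElem_range]
  rw [List.getD_eq_getElem w [] h2]

-- the flattened rows are unchanged by A's merge loop
theorem pvMergeLoopA_flatten (target : Int) (fuel : Nat) (w : List pvSeg) :
    (pvMergeLoopA target fuel w).flatten = w.flatten := by
  fun_induction pvMergeLoopA target fuel w with
  | case1 w => rfl
  | case2 w fuel h idx hidx ih =>
    rw [ih]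
    exact pvFlatten_merge w 1 (by omega) (by omega)
  | case3 w fuel h idx hidx ih =>
    have hidxlt : idx < w.length := pvMinBy_range_lt _ _ (by omega)
    rw [ih]
    exact pvFlatten_merge w idx (by omega) hidxlt
  | case4 w fuel h => rfl

theorem pvMergeLoopA_len (target : Int) (ht : 1 ≤ target) (fuel : Nat) (w : List pvSeg) :
    w ≠ [] → w.length ≤ fuel + 1 →
    (pvMergeLoopA target fuel w) ≠ [] ∧ ((pvMergeLoopA target fuel w).length : Int) ≤ target := by
  fun_induction pvMergeLoopA target fuel w with
  | case1 w =>
    intro hw hlen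
    have h1 : 0 < w.length := List.length_pos_of_ne_nil hw
    exact ⟨hw, by omega⟩
  | case2 w fuel h idx hidx ih =>
    intro _ hlen
    refine ih (by simp) (by simp only [List.length_cons, List.length_drop]; omega)
  | case3 w fuel h idx hidx ih =>
    intro _ hlen
    have hidxlt : idx < w.length := pvMinBy_range_lt _ _ (by omega)
    refine ih (by simp) (by
      simp only [List.length_append, List.length_take, List.length_cons, List.length_drop]
      omega)
  | case4 w fuel h =>
    intro hw _
    have h1 : 0 < w.length := List.length_pos_of_ne_nil hw
    exact ⟨hw, by omega⟩

theorem pvSplitLoopA_len (target : Int) (fuel : Nat) (w : List pvSeg) :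
    w ≠ [] → (w.length : Int) ≤ target → target ≤ (w.length : Int) + fuel →
    ((pvSplitLoopA target fuel w).length : Int) = target := by
  fun_induction pvSplitLoopA target fuel w with
  | case1 w =>
    intro _ hle hfe
    simp only [CharP.cast_eq_zero, add_zero] at hfe
    omega
  | case2 w fuel h idx lr heq ih =>
    intro hw hle hfe
    have hidxlt : idx < w.length := pvMaxBy_range_lt _ _ (List.length_pos_of_ne_nil hw)
    have hlen : (PySem.List.insert w ((idx + 1 : Nat) : Int) ([] : pvSeg)).length = w.length + 1 := by
      rw [PySem.List.insert_natCast _ _ _ (by omega)]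
      simp only [List.length_append, List.length_take, List.length_cons, List.length_drop]
      omega
    refine ih (List.ne_nil_of_length_pos (by omega)) ?_ ?_ <;> rw [hlen] <;> push_cast <;> omega
  | case3 w fuel h idx lr heq ih =>
    intro hw hle hfe
    have hidxlt : idx < w.length := pvMaxBy_range_lt _ _ (List.length_pos_of_ne_nil hw)
    have hlen : (PySem.List.insert (w.take idx ++ lr.1 :: w.drop (idx + 1)) ((idx + 1 : Nat) : Int) lr.2).length = w.length + 1 := by
      rw [PySem.List.insert_natCast _ _ _ (by
        simp only [List.length_append, List.length_take, List.length_cons, List.length_drop]; omega)]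
      simp only [List.length_append, List.length_take, List.length_cons, List.length_drop]
      omega
    refine ih (List.ne_nil_of_length_pos (by omega)) ?_ ?_ <;> rw [hlen] <;> push_cast <;> omega
  | case4 w fuel h =>
    intro hw hle hfe
    have h2 : ¬ (w.length : Int) < target := fun hlt => h ⟨hlt, hw⟩
    omega

-- ===== VERDICT (by name: the statement is the Claim_ definition above) =====
theorem reshape_segments_to_pages_py_spec : Claim_equal_reshape_segments_to_pages_py := by
  intro segments target_pages _
  unfold Spec_reshape_segments_to_pages_py reshape_segments_to_pages_py reshape_segments_to_pages_py_alt
  by_cases ht : target_pages ≤ 0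
  · simp only [ht, if_pos]
  · simp only [ht, if_neg, not_false_iff]
    set w0 := if segments = [] then [[]] else segments with hw0
    have hw0ne : w0 ≠ [] := by
      rw [hw0]; split
      · simp
      · assumption
    have hmapid : w0.map (fun s => s) = w0 := by simp
    rw [hmapid, if_neg hw0ne]
    set rs := w0.flatten with hrs
    set wm := pvMergeLoopA target_pages w0.length w0 with hwm
    have hm := pvMergeLoopA_len target_pages (by omega) w0.length w0 hw0ne (by omega)
    have hmf : wm.flatten = rs := pvMergeLoopA_flatten target_pages w0.length w0
    have hbl : (pvBnd 0 w0).length - 1 = w0.length := by rw [pvBnd_length]; omega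
    rw [hbl, pvMergeLoop_corr rs target_pages (by omega) w0.length w0 hw0ne rfl, ← hwm]
    have hbl2 : ((pvBnd 0 wm).length : Int) - 1 = (wm.length : Int) := by
      rw [pvBnd_length]; push_cast; omega
    rw [hbl2, pvSplitLoop_corr rs target_pages (target_pages - wm.length).toNat wm hm.1 hmf]
    set ws := pvSplitLoopA target_pages (target_pages - wm.length).toNat wm with hws
    have hs : ((ws.length : Int)) = target_pages :=
      pvSplitLoopA_len target_pages (target_pages - wm.length).toNat wm hm.1 hm.2 (by omega)
    have hsf : ws.flatten = rs := by
      rw [hws, pvSplitLoopA_flatten]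
      exact hmf
    rw [if_neg (by omega), if_neg (by omega)]
    exact (pvMaterialize rs ws hsf).symm
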